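-- pv_equiv track=rewrite | github.com/fabiohk/lar | hackerrank/interview-preparation-kit/greedy-algorithms/reverse_shuffle_merge.py | is_smallest_char
-- ===== SOURCE A (Python) =====
-- from typing import Dict, Mapping
--
-- def is_smallest_char(char: str, chars_frequency: Mapping[str, int]) -> bool:
--     chars_with_frequency_not_zero = sorted(
--         [c for c in chars_frequency if chars_frequency[c] > 0]
--     )
--     if not chars_with_frequency_not_zero:
--         return False
--
--     smallest_char = chars_with_frequency_not_zero[0]
--
--     return smallest_char == char
-- ===== SOURCE B (Python) =====
-- def is_smallest_char(char, chars_frequency):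
--     smallest = None
--     for c, freq in chars_frequency.items():
--         if freq > 0:
--             if smallest is None or c < smallest:
--                 smallest = c
--     if smallest is None:
--         return False
--     return smallest == char
-- ===== Notes on version B (the rewrite author's own statement) =====
-- stated objective: faster
-- what changed: Replaces build-a-filtered-list-then-sort-and-take-head with a single pass over the items maintaining a running minimum (found-flag via None), using the stored frequency directly instead of a per-key lookup.
import Mathlib
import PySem

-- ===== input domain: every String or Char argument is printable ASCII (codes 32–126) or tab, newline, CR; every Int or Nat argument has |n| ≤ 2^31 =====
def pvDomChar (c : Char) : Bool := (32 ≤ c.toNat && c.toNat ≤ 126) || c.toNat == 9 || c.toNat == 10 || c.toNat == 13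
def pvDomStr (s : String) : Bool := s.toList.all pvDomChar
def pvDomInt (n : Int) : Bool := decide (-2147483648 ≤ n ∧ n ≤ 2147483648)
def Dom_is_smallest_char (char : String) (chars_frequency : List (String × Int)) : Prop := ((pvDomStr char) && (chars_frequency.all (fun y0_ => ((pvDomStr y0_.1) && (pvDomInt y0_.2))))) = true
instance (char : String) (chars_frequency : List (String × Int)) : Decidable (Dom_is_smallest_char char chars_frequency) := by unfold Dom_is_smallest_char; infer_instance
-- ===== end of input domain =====

-- B replaces A's filter-then-sort-and-take-head with a single running-minimum pass over the items (faster, one pass, no sort).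


-- ===== PORT A =====
-- `chars_frequency[c]` is looked up with get?; c always comes from the dict's own keys, so the
-- lookup is `some` and `.getD 0` never substitutes (exact: KeyError is unreachable here).
def is_smallest_char (char : String) (chars_frequency : List (String × Int)) : Bool :=
  let d := PySem.Dict.mk chars_frequency
  let chars_with_frequency_not_zero :=
    PySem.List.sorted
      ((chars_frequency.map (·.1)).filter (fun c => decide (0 < (d.get? c).getD 0)))
      (fun x => x) false
  match chars_with_frequency_not_zero with
  | [] => false
  | smallest_char :: _ => smallest_char == char

-- ===== PORT B =====
-- running-minimum step: `if smallest is None or c < smallest: smallest = c`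
def pvMinStep (acc : Option String) (c : String) : Option String :=
  match acc with
  | none => some c
  | some s => if c < s then some c else acc

def is_smallest_char_alt (char : String) (chars_frequency : List (String × Int)) : Bool :=
  let smallest := chars_frequency.foldl
    (fun acc p => if decide (0 < p.2) then pvMinStep acc p.1 else acc) none
  match smallest with
  | none => false
  | some s => s == char

-- ===== PRECONDITION & SPEC =====
-- Pre_ states the dict representation invariant only: keys are pairwise distinct, as they are in
-- every Python dict/Mapping; it excludes no input the Python function can actually receive.
def Pre_is_smallest_char (char : String) (chars_frequency : List (String × Int)) : Prop :=
  (chars_frequency.map (·.1)).Nodup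
instance (char : String) (chars_frequency : List (String × Int)) : Decidable (Pre_is_smallest_char char chars_frequency) := by unfold Pre_is_smallest_char; infer_instance

def pvWitness_is_smallest_char : String × (List (String × Int)) := ("a", [("a", 1), ("b", 0)])

def Spec_is_smallest_char (char : String) (chars_frequency : List (String × Int)) (out : Bool) : Prop := out = is_smallest_char_alt char chars_frequency
instance (char : String) (chars_frequency : List (String × Int)) (out : Bool) : Decidable (Spec_is_smallest_char char chars_frequency out) := by unfold Spec_is_smallest_char; infer_instance

-- ===== CLAIM (what is proved, stated in full; the proofs are below) =====
def Claim_equal_is_smallest_char : Prop := ∀ (char : String) (chars_frequency : List (String × Int)), Dom_is_smallest_char char chars_frequency → Pre_is_smallest_char char chars_frequency → Spec_is_smallest_char char chars_frequency (is_smallest_char char chars_frequency)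

-- ===== LEMMAS AND PROOFS =====

-- With distinct keys, filtering A's keys by dict lookup is the same as keeping the keys of the
-- positive-frequency pairs.
theorem pv_filter_keys (cf : List (String × Int)) (h : (cf.map (·.1)).Nodup) :
    (cf.map (·.1)).filter (fun c => decide (0 < ((PySem.Dict.mk cf).get? c).getD 0))
      = (cf.filter (fun p => decide (0 < p.2))).map (·.1) := by
  induction cf with
  | nil => simp
  | cons kv t ih =>
    obtain ⟨k, v⟩ := kv
    simp only [List.map_cons, List.nodup_cons] at h
    have htail : ∀ c ∈ t.map (·.1),
        (decide (0 < ((PySem.Dict.mk ((k, v) :: t)).get? c).getD 0))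
          = (decide (0 < ((PySem.Dict.mk t).get? c).getD 0)) := by
      intro c hc
      have hne : ¬ (k = c) := fun hk => h.1 (hk ▸ hc)
      simp [PySem.Dict.get?_mk_cons, hne]
    rw [List.map_cons, List.filter_cons, List.filter_congr htail, ih h.2, List.filter_cons]
    have hk : ((PySem.Dict.mk ((k, v) :: t)).get? k).getD 0 = v := by
      simp [PySem.Dict.get?_mk_cons]
    rw [hk]
    by_cases hv : (0 : Int) < v
    · simp [hv]
    · simp [hv]

-- B's fold over pairs is the plain min-fold over the kept keys.
theorem pv_fold_filter (cf : List (String × Int)) (acc : Option String) :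
    cf.foldl (fun acc p => if decide (0 < p.2) then pvMinStep acc p.1 else acc) acc
      = ((cf.filter (fun p => decide (0 < p.2))).map (·.1)).foldl pvMinStep acc := by
  induction cf generalizing acc with
  | nil => rfl
  | cons p t ih =>
    rw [List.foldl_cons, List.filter_cons]
    by_cases hp : decide (0 < p.2) = true
    · rw [if_pos hp, if_pos hp, List.map_cons, List.foldl_cons]; exact ih _
    · rw [if_neg hp, if_neg hp]; exact ih _

-- The min-fold from `some m` returns a minimum of m and the list.
theorem pv_fold_min (ks : List String) : ∀ (m : String),
    ∃ r, ks.foldl pvMinStep (some m) = some r ∧ r ≤ m ∧ (r = m ∨ r ∈ ks) ∧ ∀ y ∈ ks, r ≤ y := by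
  induction ks with
  | nil => intro m; exact ⟨m, rfl, le_refl m, Or.inl rfl, by simp⟩
  | cons k t ih =>
    intro m
    by_cases hk : k < m
    · obtain ⟨r, hr, hrm, hmem, hall⟩ := ih k
      refine ⟨r, ?_, le_of_lt (lt_of_le_of_lt hrm hk), ?_, ?_⟩
      · simpa [pvMinStep, hk] using hr
      · rcases hmem with h | h
        · exact Or.inr (by simp [h])
        · exact Or.inr (List.mem_cons_of_mem _ h)
      · intro y hy
        rcases List.mem_cons.mp hy with h | h
        · exact h ▸ hrm
        · exact hall y h
    · obtain ⟨r, hr, hrm, hmem, hall⟩ := ih m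
      refine ⟨r, ?_, hrm, ?_, ?_⟩
      · simpa [pvMinStep, hk] using hr
      · rcases hmem with h | h
        · exact Or.inl h
        · exact Or.inr (List.mem_cons_of_mem _ h)
      · intro y hy
        rcases List.mem_cons.mp hy with h | h
        · exact h ▸ le_trans hrm (le_of_not_gt hk)
        · exact hall y h

-- head of sorted = result of the min-fold, for any list of strings.
theorem pv_sorted_head_eq_fold (ks : List String) :
    (match PySem.List.sorted ks (fun x => x) false with
      | [] => (none : Option String)
      | s :: _ => some s)
      = ks.foldl pvMinStep none := by
  cases hks : ks with
  | nil => simp [PySem.List.sorted]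
  | cons k t =>
    obtain ⟨r, hr, hrk, hmem, hall⟩ := pv_fold_min t k
    have hmem' : r ∈ k :: t := by
      rcases hmem with h | h
      · simp [h]
      · exact List.mem_cons_of_mem _ h
    cases hs : PySem.List.sorted (k :: t) (fun x => x) false with
    | nil => exact absurd ((PySem.List.sorted_eq_nil_iff _ _ _).mp hs) (by simp)
    | cons m t' =>
      have hm_mem : m ∈ k :: t := (PySem.List.mem_sorted _ _ _ _).mp (hs ▸ List.mem_cons_self)
      have hm_le : ∀ y ∈ k :: t, m ≤ y := PySem.List.key_head_sorted_le _ _ hs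
      have hr_le : ∀ y ∈ k :: t, r ≤ y := by
        intro y hy
        rcases List.mem_cons.mp hy with h | h
        · exact h ▸ hrk
        · exact hall y h
      have : m = r := le_antisymm (hm_le r hmem') (hr_le m hm_mem)
      simp [List.foldl_cons, pvMinStep, hr, this]

-- ===== VERDICT (by name: the statement is the Claim_ definition above) =====
theorem is_smallest_char_spec : Claim_equal_is_smallest_char := by
  intro char cf _ hpre
  unfold Spec_is_smallest_char is_smallest_char is_smallest_char_alt
  rw [pv_fold_filter, ← pv_filter_keys cf hpre, ← pv_sorted_head_eq_fold]
  cases h : PySem.List.sorted ((cf.map (·.1)).filter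
      (fun c => decide (0 < ((PySem.Dict.mk cf).get? c).getD 0))) (fun x => x) false <;>
    simp [h]
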